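-- pv_equiv track=rewrite | github.com/scissorsneedfoodtoo/automate-the-boring-stuff-coursework | 4-lists/comma-code.py | listifier
-- ===== SOURCE A (Python) =====
-- def listifier(user_list):
--     output = ""
--     for index, entry in enumerate(user_list):
--         final_index = len(user_list) - 1
--         if index < final_index:
--             output += entry + ", "
--         else:
--             output += "and " + entry
--     return output
-- ===== SOURCE B (Python) =====
-- def listifier(user_list):
--     if not user_list:
--         return ""
--     s = ", ".join(user_list)
--     cut = len(s) - len(user_list[-1])
--     return s[:cut] + "and " + s[cut:]
-- ===== Notes on version B (the rewrite author's own statement) =====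
-- stated objective: faster
-- what changed: Instead of A's per-element loop with an index<final_index branch and a growing += accumulator, B builds the whole string once with ', '.join and splices 'and ' in at the position computed by length arithmetic (len(s) - len(user_list[-1])), so no element-by-element branching or accumulation happens at all.
import Mathlib
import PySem

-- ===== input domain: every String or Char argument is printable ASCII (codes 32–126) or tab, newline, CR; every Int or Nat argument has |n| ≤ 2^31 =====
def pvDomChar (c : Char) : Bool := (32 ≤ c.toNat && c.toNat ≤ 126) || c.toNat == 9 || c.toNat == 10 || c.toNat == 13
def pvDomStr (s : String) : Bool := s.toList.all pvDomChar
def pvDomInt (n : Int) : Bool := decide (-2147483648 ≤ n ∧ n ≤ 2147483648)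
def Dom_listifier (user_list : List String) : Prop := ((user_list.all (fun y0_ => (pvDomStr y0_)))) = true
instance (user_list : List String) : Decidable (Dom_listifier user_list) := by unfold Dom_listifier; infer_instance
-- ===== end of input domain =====

-- B builds the whole string with one ", ".join and splices "and " in at a position computed by length arithmetic, instead of A's per-element loop with an index<final_index branch; objective: alternative.


-- ===== PORT A =====
-- the enumerate loop, step for step: index i, accumulator out, and A's `index < final_index` branch
def listifierGo (n : Nat) (i : Nat) (out : String) : List String → String
  | [] => out
  | e :: rest =>
      listifierGo n (i + 1)
        (if (i : Int) < (n : Int) - 1 then out ++ (e ++ ", ") else out ++ ("and " ++ e)) rest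

def listifier (user_list : List String) : String :=
  listifierGo user_list.length 0 "" user_list

-- ===== PORT B =====
-- Source B: guard empty; s = ", ".join(user_list); cut = len(s) - len(user_list[-1]); s[:cut] + "and " + s[cut:]
def listifier_alt (user_list : List String) : String :=
  if user_list = [] then ""
  else
    let s := PySem.Str.join ", " user_list
    -- user_list[-1]: pyGet? is some on the nonempty list; getD "" is unreachable
    let cut : Int := PySem.Str.len s - PySem.Str.len ((PySem.List.pyGet? user_list (-1)).getD "")
    PySem.Str.slice s none (some cut) ++ "and " ++ PySem.Str.slice s (some cut) none

-- ===== PRECONDITION & SPEC =====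
def Spec_listifier (user_list : List String) (out : String) : Prop := out = listifier_alt user_list
instance (user_list : List String) (out : String) : Decidable (Spec_listifier user_list out) := by unfold Spec_listifier; infer_instance

-- ===== CLAIM (what is proved, stated in full; the proofs are below) =====
def Claim_equal_listifier : Prop := ∀ (user_list : List String), Dom_listifier user_list → Spec_listifier user_list (listifier user_list)

-- ===== LEMMAS AND PROOFS =====

-- common reference form: structural recursion on the list
def pvRec : List String → String
  | [] => ""
  | [x] => "and " ++ x
  | x :: y :: ys => x ++ ", " ++ pvRec (y :: ys)

-- A's loop produces the reference form
theorem listifierGo_spec (rest : List String) : ∀ (n i : Nat) (out : String),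
    i + rest.length = n → listifierGo n i out rest = out ++ pvRec rest := by
  induction rest with
  | nil => intro n i out _; simp [listifierGo, pvRec]
  | cons e rest ih =>
      intro n i out h
      cases rest with
      | nil =>
          have hi : ¬ ((i : Int) < (n : Int) - 1) := by simp at h; omega
          simp [listifierGo, hi, pvRec]
      | cons y ys =>
          have hi : (i : Int) < (n : Int) - 1 := by simp at h; omega
          have h' : (i + 1) + (y :: ys).length = n := by simp at h ⊢; omega
          rw [listifierGo, if_pos hi, ih n (i+1) _ h']
          simp [pvRec, String.append_assoc]

-- the characters before the last element in the joined string
def pvMid (l : List String) : List Char :=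
  (l.dropLast.map (fun e => e.toList ++ [',', ' '])).flatten

theorem join_split (x : String) (xs : List String) :
    PySem.Chars.join (", ".toList) ((x :: xs).map String.toList)
      = pvMid (x :: xs) ++ ((x :: xs).getLastD "").toList := by
  induction xs generalizing x with
  | nil => simp [PySem.Chars.join_singleton, pvMid]
  | cons y ys ih =>
      simp only [List.map_cons]
      rw [PySem.Chars.join_cons_cons, ← List.map_cons (f := String.toList), ih y]
      simp [pvMid]

theorem rec_toList (x : String) (xs : List String) :
    (pvRec (x :: xs)).toList = pvMid (x :: xs) ++ ("and ".toList) ++ ((x :: xs).getLastD "").toList := by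
  induction xs generalizing x with
  | nil => simp [pvRec, pvMid]
  | cons y ys ih =>
      rw [pvRec]
      simp only [String.toList_append]
      rw [ih y]
      simp [pvMid]

theorem alt_eq_rec (l : List String) : listifier_alt l = pvRec l := by
  cases l with
  | nil => simp [listifier_alt, pvRec]
  | cons x xs =>
      apply String.toList_inj.mp
      have hget : (PySem.List.pyGet? (x :: xs) (-1)).getD "" = (x :: xs).getLastD "" := by
        rw [PySem.List.pyGet?_neg_one, ← List.getLastD_eq_getLast?]
      have hs : (PySem.Str.join ", " (x :: xs)).toList
          = pvMid (x :: xs) ++ ((x :: xs).getLastD "").toList := by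
        rw [PySem.Str.toList_join, join_split]
      have hcut : PySem.Str.len (PySem.Str.join ", " (x :: xs))
            - PySem.Str.len ((PySem.List.pyGet? (x :: xs) (-1)).getD "")
          = ((pvMid (x :: xs)).length : Int) := by
        rw [hget, PySem.Str.len_eq, PySem.Str.len_eq, hs]
        push_cast [List.length_append]
        ring
      rw [listifier_alt, if_neg (by simp)]
      simp only []
      rw [hcut, rec_toList]
      simp only [String.toList_append, PySem.Str.toList_slice,
        PySem.Chars.slice_eq_listSlice, PySem.List.slice_to_natCast,
        PySem.List.slice_from_natCast, hs]
      rw [List.take_left' rfl, List.drop_left' rfl]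

-- ===== VERDICT (by name: the statement is the Claim_ definition above) =====
theorem listifier_spec : Claim_equal_listifier := by
  intro l _
  unfold Spec_listifier listifier
  rw [alt_eq_rec]
  exact (listifierGo_spec l l.length 0 "" (by simp)).trans (by simp)
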